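-- pv_equiv track=rewrite | github.com/MOHITSAHAL/PROJECT_RESEARCH | ai-service/genealogy/citation_analyzer.py | _calculate_year_span
-- ===== SOURCE A (Python) =====
-- from typing import List, Dict, Any, Optional, Tuple
--
-- def _calculate_year_span(lineage: List[Dict[str, Any]]) -> Dict[str, Any]:
--     """Calculate year span of a research lineage"""
--     years = [paper.get('year') for paper in lineage if paper.get('year')]
--
--     if not years:
--         return {"start": None, "end": None, "span": 0}
--
--     return {
--         "start": min(years),
--         "end": max(years),
--         "span": max(years) - min(years)
--     }
-- ===== SOURCE B (Python) =====
-- def _calculate_year_span(lineage):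
--     """Calculate year span of a research lineage (single pass, no intermediate list)."""
--     start = end = None
--     for paper in lineage:
--         y = paper.get('year')
--         if y:
--             if start is None:
--                 start = end = y
--             else:
--                 if y < start:
--                     start = y
--                 if end < y:
--                     end = y
--     if start is None:
--         return {"start": None, "end": None, "span": 0}
--     return {"start": start, "end": end, "span": end - start}
-- ===== Notes on version B (the rewrite author's own statement) =====
-- stated objective: alternative
-- what changed: Replaced the comprehension that materializes a years list plus two min()/max() scans with a single fold over lineage maintaining running (start, end) extremes.
import Mathlib
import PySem

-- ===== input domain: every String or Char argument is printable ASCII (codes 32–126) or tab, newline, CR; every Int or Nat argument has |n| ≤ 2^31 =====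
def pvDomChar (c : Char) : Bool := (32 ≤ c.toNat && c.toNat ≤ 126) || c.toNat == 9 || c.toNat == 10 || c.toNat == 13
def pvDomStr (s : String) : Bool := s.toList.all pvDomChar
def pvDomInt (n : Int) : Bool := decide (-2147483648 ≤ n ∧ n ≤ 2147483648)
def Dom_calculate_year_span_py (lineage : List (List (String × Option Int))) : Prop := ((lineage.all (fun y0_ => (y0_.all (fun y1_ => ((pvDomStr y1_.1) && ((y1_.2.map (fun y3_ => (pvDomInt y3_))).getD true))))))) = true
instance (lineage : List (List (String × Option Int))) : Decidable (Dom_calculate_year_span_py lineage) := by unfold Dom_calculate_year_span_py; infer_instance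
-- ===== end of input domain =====

-- B replaces the comprehension plus min()/max() scans by one fold keeping running extremes (alternative decomposition, same cost).

-- ===== PORT A =====
-- paper.get('year') is truthy iff the key is present, its value is not None and not 0
def pvYearOf (paper : List (String × Option Int)) : Option Int :=
  match PySem.Dict.get? (PySem.Dict.mk paper) "year" with
  | some (some y) => if y ≠ 0 then some y else none
  | _ => none

def calculate_year_span_py (lineage : List (List (String × Option Int))) : List (String × Option Int) :=
  let years : List Int := lineage.filterMap pvYearOf
  if years = [] then
    [("start", none), ("end", none), ("span", some 0)]
  else
    match PySem.List.min? years (fun y => y), PySem.List.max? years (fun y => y) with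
    | some a, some b => [("start", some a), ("end", some b), ("span", some (b - a))]
    | _, _ => []   -- unreachable: years ≠ []

-- ===== PORT B =====
def pvStep (acc : Option (Int × Int)) (paper : List (String × Option Int)) : Option (Int × Int) :=
  match pvYearOf paper with
  | some y =>
    match acc with
    | none => some (y, y)
    | some (s, e) => some (if y < s then y else s, if e < y then y else e)
  | none => acc

def calculate_year_span_py_alt (lineage : List (List (String × Option Int))) : List (String × Option Int) :=
  match lineage.foldl pvStep none with
  | none => [("start", none), ("end", none), ("span", some 0)]
  | some (s, e) => [("start", some s), ("end", some e), ("span", some (e - s))]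

-- ===== PRECONDITION & SPEC =====
def Spec_calculate_year_span_py (lineage : List (List (String × Option Int))) (out : List (String × Option Int)) : Prop := out = calculate_year_span_py_alt lineage
instance (lineage : List (List (String × Option Int))) (out : List (String × Option Int)) : Decidable (Spec_calculate_year_span_py lineage out) := by unfold Spec_calculate_year_span_py; infer_instance

-- ===== CLAIM (what is proved, stated in full; the proofs are below) =====
def Claim_equal_calculate_year_span_py : Prop := ∀ (lineage : List (List (String × Option Int))), Dom_calculate_year_span_py lineage → Spec_calculate_year_span_py lineage (calculate_year_span_py lineage)

-- ===== LEMMAS AND PROOFS =====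

-- the fold over lineage only looks at pvYearOf of each paper, so it is the fold over the filtered years list
theorem foldl_step_filterMap (lineage : List (List (String × Option Int))) (acc : Option (Int × Int)) :
    lineage.foldl pvStep acc
      = (lineage.filterMap pvYearOf).foldl
          (fun acc y => match acc with
            | none => some (y, y)
            | some (s, e) => some (if y < s then y else s, if e < y then y else e)) acc := by
  induction lineage generalizing acc with
  | nil => simp
  | cons p t ih =>
    cases hy : pvYearOf p <;>
      simp [hy, ih, pvStep]

-- running the pair fold from an initialized accumulator computes running min/max
theorem foldl_pair_min_max (ys : List Int) (s e : Int) :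
    ys.foldl (fun acc y => match acc with
        | none => some (y, y)
        | some (s, e) => some (if y < s then y else s, if e < y then y else e))
      (some (s, e)) = some (ys.foldl min s, ys.foldl max e) := by
  induction ys generalizing s e with
  | nil => simp
  | cons y t ih =>
    have h1 : (if y < s then y else s) = min s y := by rw [min_def]; split_ifs <;> omega
    have h2 : (if e < y then y else e) = max e y := by rw [max_def]; split_ifs <;> omega
    simp only [List.foldl_cons, ih, h1, h2]

-- ===== VERDICT (by name: the statement is the Claim_ definition above) =====
theorem calculate_year_span_py_spec : Claim_equal_calculate_year_span_py := by
  intro lineage _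
  unfold Spec_calculate_year_span_py calculate_year_span_py calculate_year_span_py_alt
  rw [foldl_step_filterMap]
  cases h : lineage.filterMap pvYearOf with
  | nil => simp
  | cons y t =>
    simp only [List.foldl_cons, foldl_pair_min_max,
      PySem.List.min?_id_cons, PySem.List.max?_id_cons]
    simp
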